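-- pv_equiv track=rewrite | github.com/lmiksch/CocoSim | cocosim/utils.py | is_legal_dotbracket
-- ===== SOURCE A (Python) =====
-- def is_legal_dotbracket(structure):
--     """
--     Check if a dot-bracket structure is legal.
--
--     A legal structure only contains the characters '(', ')', and '.',
--     and every opening parenthesis '(' must be matched with a closing ')'.
--
--     Args:
--         structure (str): The dot-bracket structure to check.
--
--     Returns:
--         bool: True if the structure is legal, False otherwise.
--     """
--     allowed_chars = {'(', ')', '.'}
--
--     # Check for any invalid characters
--     for char in structure:
--         if char not in allowed_chars:
--             return False
--
--     # Check for balanced parentheses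
--     stack = []
--     for char in structure:
--         if char == '(':
--             stack.append('(')
--         elif char == ')':
--             if not stack:
--                 return False  # Unmatched closing parenthesis
--             stack.pop()
--
--     # If stack is empty, all opening parentheses were properly closed
--     return len(stack) == 0
-- ===== SOURCE B (Python) =====
-- def is_legal_dotbracket(structure):
--     if set(structure) - {'(', ')', '.'}:
--         return False
--     s = structure.replace('.', '')
--     while '()' in s:
--         s = s.replace('()', '')
--     return s == ''
-- ===== Notes on version B (the rewrite author's own statement) =====
-- stated objective: alternative
-- what changed: Replaces the explicit stack balance check with a set-difference character test followed by an iterative reduction that strips the dots and repeatedly collapses adjacent open-close bracket pairs until nothing changes, returning True iff the string reduces to empty.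
import Mathlib
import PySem

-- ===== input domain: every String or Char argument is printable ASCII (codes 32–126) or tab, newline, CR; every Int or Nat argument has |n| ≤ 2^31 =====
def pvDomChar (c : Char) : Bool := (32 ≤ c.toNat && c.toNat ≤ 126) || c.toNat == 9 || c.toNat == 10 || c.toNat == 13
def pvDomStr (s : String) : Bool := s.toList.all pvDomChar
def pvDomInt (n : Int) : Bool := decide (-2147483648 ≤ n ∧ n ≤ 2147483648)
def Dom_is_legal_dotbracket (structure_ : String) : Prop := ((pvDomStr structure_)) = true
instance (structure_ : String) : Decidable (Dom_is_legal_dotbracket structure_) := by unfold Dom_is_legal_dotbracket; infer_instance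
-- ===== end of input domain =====

-- B is an alternative algorithm of similar size: it replaces A's explicit stack with an
-- iterative reduction that strips dots and repeatedly collapses "()" pairs until fixpoint.

-- ===== PORT A =====
-- A's balance loop: state is the stack (list of '('); `none` models the early `return False`
-- on an unmatched ')'.
def pvLoopA : List Char → List Char → Option (List Char)
  | [], stack => some stack
  | c :: t, stack =>
    if c = '(' then pvLoopA t ('(' :: stack)
    else if c = ')' then
      match stack with
      | [] => none
      | _ :: s => pvLoopA t s
    else pvLoopA t stack

def is_legal_dotbracket (structure_ : String) : Bool :=
  let cs := structure_.toList
  -- first loop: any invalid character → False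
  if cs.all (fun c => c = '(' || c = ')' || c = '.') then
    match pvLoopA cs [] with
    | none => false
    | some stack => stack.length == 0
  else false

-- ===== PORT B =====
-- one pass of Python's s.replace("()", ""): remove non-overlapping "()" left to right
def pvRep : List Char → List Char
  | [] => []
  | [c] => [c]
  | c :: c' :: t => if c = '(' ∧ c' = ')' then pvRep t else c :: pvRep (c' :: t)

-- '()' in s
def pvHasPair : List Char → Bool
  | [] => false
  | [_] => false
  | c :: c' :: t => (c = '(' && c' = ')') || pvHasPair (c' :: t)

-- lemmas the while-loop's termination needs (cited by pvReduce's decreasing_by)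
theorem pvRep_length_le (l : List Char) : (pvRep l).length ≤ l.length := by
  induction l using pvRep.induct with
  | case1 => simp [pvRep]
  | case2 c => simp [pvRep]
  | case3 c c' t h ih => simp only [pvRep, if_pos h]; simp at ih ⊢; omega
  | case4 c c' t h ih => simp only [pvRep, if_neg h]; simp at ih ⊢; omega

theorem pvRep_length_lt (l : List Char) (hpair : pvHasPair l = true) :
    (pvRep l).length < l.length := by
  induction l using pvRep.induct with
  | case1 => simp [pvHasPair] at hpair
  | case2 c => simp [pvHasPair] at hpair
  | case3 c c' t hp _ =>
      have := pvRep_length_le t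
      simp only [pvRep, if_pos hp]; simp; omega
  | case4 c c' t hp ih =>
      simp only [pvHasPair, Bool.or_eq_true, Bool.and_eq_true, decide_eq_true_eq] at hpair
      rcases hpair with ⟨h1, h2⟩ | h'
      · exact absurd ⟨h1, h2⟩ hp
      · have := ih h'
        simp only [pvRep, if_neg hp]; simp at this ⊢; omega

-- while '()' in s: s = s.replace('()','')
def pvReduce (l : List Char) : List Char :=
  if h : pvHasPair l = true then pvReduce (pvRep l) else l
termination_by l.length
decreasing_by exact pvRep_length_lt l h

def is_legal_dotbracket_alt (structure_ : String) : Bool :=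
  let cs := structure_.toList
  -- set(structure) - {'(', ')', '.'} is nonempty iff some character is outside the set
  if cs.any (fun c => !(c = '(' || c = ')' || c = '.')) then false
  else
    -- structure.replace('.', '') then reduce; return s == ''
    pvReduce (cs.filter (fun c => c ≠ '.')) == []

-- ===== PRECONDITION & SPEC =====
def Spec_is_legal_dotbracket (structure_ : String) (out : Bool) : Prop := out = is_legal_dotbracket_alt structure_
instance (structure_ : String) (out : Bool) : Decidable (Spec_is_legal_dotbracket structure_ out) := by unfold Spec_is_legal_dotbracket; infer_instance

-- ===== CLAIM (what is proved, stated in full; the proofs are below) =====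
def Claim_equal_is_legal_dotbracket : Prop := ∀ (structure_ : String), Dom_is_legal_dotbracket structure_ → Spec_is_legal_dotbracket structure_ (is_legal_dotbracket structure_)

-- ===== LEMMAS AND PROOFS =====

-- one replace pass does not change what A's stack machine computes
theorem pvLoopA_rep (l : List Char) : ∀ st, pvLoopA (pvRep l) st = pvLoopA l st := by
  induction l using pvRep.induct with
  | case1 => intro st; rfl
  | case2 c => intro st; rfl
  | case3 c c' t h ih =>
      intro st
      obtain ⟨h1, h2⟩ := h
      subst h1; subst h2
      have hr : pvRep ('(' :: ')' :: t) = pvRep t := by simp [pvRep]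
      rw [hr, ih st]
      simp [pvLoopA]
  | case4 c c' t h ih =>
      intro st
      simp only [pvRep, if_neg h]
      by_cases hc : c = '('
      · subst hc; simp only [pvLoopA]; simp only [if_true]; exact ih _
      · by_cases hc' : c = ')'
        · subst hc'
          cases st with
          | nil => simp [pvLoopA, hc]
          | cons x s => simp only [pvLoopA]; simp; exact ih _
        · simp only [pvLoopA, if_neg hc, if_neg hc']; exact ih _

theorem pvLoopA_reduce (l : List Char) : ∀ st, pvLoopA (pvReduce l) st = pvLoopA l st := by
  induction l using pvReduce.induct with
  | case1 l h ih =>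
      intro st
      rw [pvReduce, dif_pos h, ih st, pvLoopA_rep]
  | case2 l h =>
      intro st
      rw [pvReduce, dif_neg h]

theorem pvReduce_noPair (l : List Char) : pvHasPair (pvReduce l) = false := by
  induction l using pvReduce.induct with
  | case1 l h ih => rw [pvReduce, dif_pos h]; exact ih
  | case2 l h => rw [pvReduce, dif_neg h]; simpa using h

-- characters of pvRep / pvReduce come from the input
theorem pvRep_parens (l : List Char) (h : ∀ c ∈ l, c = '(' ∨ c = ')') :
    ∀ c ∈ pvRep l, c = '(' ∨ c = ')' := by
  induction l using pvRep.induct with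
  | case1 => simp [pvRep]
  | case2 c => simpa [pvRep] using h
  | case3 c c' t hp ih =>
      simp only [pvRep, if_pos hp]
      exact ih (fun x hx => h x (by simp [hx]))
  | case4 c c' t hp ih =>
      simp only [pvRep, if_neg hp]
      intro x hx
      rcases List.mem_cons.mp hx with rfl | hx
      · exact h x (by simp)
      · exact ih (fun y hy => h y (by simp at hy ⊢; tauto)) x hx

theorem pvReduce_parens (l : List Char) (h : ∀ c ∈ l, c = '(' ∨ c = ')') :
    ∀ c ∈ pvReduce l, c = '(' ∨ c = ')' := by
  induction l using pvReduce.induct with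
  | case1 l hp ih => rw [pvReduce, dif_pos hp]; exact ih (pvRep_parens l h)
  | case2 l hp => rw [pvReduce, dif_neg hp]; exact h

-- a fully reduced paren string has the shape ")"^a ++ "("^b
theorem noPair_shape (l : List Char) (hp : ∀ c ∈ l, c = '(' ∨ c = ')')
    (h : pvHasPair l = false) :
    ∃ a b, l = List.replicate a ')' ++ List.replicate b '(' := by
  induction l with
  | nil => exact ⟨0, 0, rfl⟩
  | cons c t ih =>
      have ht : pvHasPair t = false := by
        cases t with
        | nil => rfl
        | cons c' t' => simp only [pvHasPair] at h; simp at h; tauto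
      obtain ⟨a, b, rfl⟩ := ih (fun x hx => hp x (by simp [hx])) ht
      rcases hp c (by simp) with rfl | rfl
      · -- c = '(' : then a must be 0, else "()"-pair at the head
        have ha : a = 0 := by
          by_contra hne
          obtain ⟨a', rfl⟩ := Nat.exists_eq_succ_of_ne_zero hne
          simp [List.replicate_succ, pvHasPair] at h
        subst ha
        exact ⟨0, b + 1, by simp [List.replicate_succ]⟩
      · exact ⟨a + 1, b, by simp [List.replicate_succ]⟩

theorem pvLoopA_opens (b : Nat) : ∀ st, pvLoopA (List.replicate b '(') st =
    some (List.replicate b '(' ++ st) := by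
  induction b with
  | zero => intro st; rfl
  | succ n ih =>
      intro st
      rw [List.replicate_succ]
      have hstep : pvLoopA ('(' :: List.replicate n '(') st
          = pvLoopA (List.replicate n '(') ('(' :: st) := by simp [pvLoopA]
      rw [hstep, ih]
      congr 1
      rw [List.append_cons, ← List.replicate_succ', List.replicate_succ]

theorem noPair_some_nil (l : List Char) (hp : ∀ c ∈ l, c = '(' ∨ c = ')')
    (h : pvHasPair l = false) (he : pvLoopA l [] = some []) : l = [] := by
  obtain ⟨a, b, rfl⟩ := noPair_shape l hp h
  cases a with
  | zero =>
      simp only [List.replicate_zero, List.nil_append] at he ⊢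
      rw [pvLoopA_opens b []] at he
      simp at he
      simp [he]
  | succ a' =>
      rw [List.replicate_succ] at he
      simp [pvLoopA] at he

-- A's machine ignores '.' characters
theorem pvLoopA_filter_dot (l : List Char)
    (h : ∀ c ∈ l, c = '(' ∨ c = ')' ∨ c = '.') :
    ∀ st, pvLoopA l st = pvLoopA (l.filter (fun c => c ≠ '.')) st := by
  induction l with
  | nil => intro st; rfl
  | cons c t ih =>
      intro st
      have hc := h c (by simp)
      have hti := ih (fun x hx => h x (by simp [hx]))
      rcases hc with rfl | rfl | rfl
      · simpa [pvLoopA] using hti ('(' :: st)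
      · cases st with
        | nil => simp [pvLoopA]
        | cons x s => simpa [pvLoopA, List.filter_cons] using hti s
      · simpa [pvLoopA, List.filter_cons] using hti st

-- ===== VERDICT (by name: the statement is the Claim_ definition above) =====
theorem is_legal_dotbracket_spec : Claim_equal_is_legal_dotbracket := by
  intro s _
  unfold Spec_is_legal_dotbracket is_legal_dotbracket is_legal_dotbracket_alt
  set cs := s.toList with hcs
  by_cases hall : cs.all (fun c => c = '(' || c = ')' || c = '.') = true
  · -- every character is allowed
    have hany : cs.any (fun c => !(c = '(' || c = ')' || c = '.')) = false := by
      simp only [List.any_eq_false]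
      intro c hc
      have h1 := (List.all_eq_true.mp hall) c hc
      simp at h1 ⊢
      tauto
    simp only [hall, if_true, hany, Bool.false_eq_true, if_false]
    have hallowed : ∀ c ∈ cs, c = '(' ∨ c = ')' ∨ c = '.' := by
      intro c hc
      have := (List.all_eq_true.mp hall) c hc
      simp at this; tauto
    set f := pvReduce (cs.filter (fun c => c ≠ '.')) with hf
    have hfp : ∀ c ∈ f, c = '(' ∨ c = ')' := by
      apply pvReduce_parens
      intro c hc
      rw [List.mem_filter] at hc
      rcases hallowed c hc.1 with h | h | h
      · exact Or.inl h
      · exact Or.inr h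
      · exfalso; have := hc.2; simp [h] at this
    have hstep : pvLoopA cs [] = pvLoopA f [] := by
      rw [pvLoopA_filter_dot cs hallowed, hf, pvLoopA_reduce]
    rw [hstep]
    by_cases hfe : f = []
    · simp [hfe, pvLoopA]
    · have hnp := pvReduce_noPair (cs.filter (fun c => c ≠ '.'))
      rw [← hf] at hnp
      have hns : pvLoopA f [] ≠ some [] := fun hx => hfe (noPair_some_nil f hfp hnp hx)
      cases hout : pvLoopA f [] with
      | none => simp [hfe]
      | some st =>
          cases st with
          | nil => exact absurd hout hns
          | cons x t => simp [hfe]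
  · -- some character is invalid: both return false
    have hany : cs.any (fun c => !(c = '(' || c = ')' || c = '.')) = true := by
      rw [List.all_eq_true] at hall
      push Not at hall
      obtain ⟨c, hc, hne⟩ := hall
      rw [List.any_eq_true]
      exact ⟨c, hc, by simp_all⟩
    rw [if_neg hall, if_pos hany]
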